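-- pv_equiv track=rewrite | github.com/lollyluann/CDIAC-clust | paths_work/paths_clustering/generate_token_dict.py | gen_tokens
-- ===== SOURCE A (Python) =====
-- def gen_tokens(pathname, length):
--     file_token_dict = {}
--     # generates a string of length "length - 1" of all "/"s
--     filler = "".join(((length-1)*["|"]))
--     orig_name = pathname
--     # makes "pathname" look like "|||<old_pathname>|||"
--     pathname = filler + pathname + filler
--     # we stop "length - 1" characters from the end of the filename
--     # with the filler on each end so that we aren't appending
--     # tokens which consist only of filler characters ("|"s)
--
--     token_list = []
--     for pos in range(0,len(pathname) - (length - 1)):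
--         token_list.append(pathname[pos:pos+length])
--     return token_list
-- ===== SOURCE B (Python) =====
-- def gen_tokens(pathname, length):
--     filler = "|" * (length - 1)
--     padded = filler + pathname + filler
--     return ["".join(t) for t in zip(*(padded[i:] for i in range(length)))]
-- ===== Notes on version B (the rewrite author's own statement) =====
-- stated objective: idiomatic
-- what changed: Replaces the explicit index loop appending padded[pos:pos+length] with the zip-of-shifted-suffixes n-gram idiom: zip(*(padded[i:] for i in range(length))) transposes length offset views column-wise and joins each column into a token.
-- outside the precondition, e.g. on gen_tokens('ab', 0): A returns ['', '', ''], B returns []; on gen_tokens('abc', -1): A returns ['ab', '', '', '', ''], B returns []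
import Mathlib
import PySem

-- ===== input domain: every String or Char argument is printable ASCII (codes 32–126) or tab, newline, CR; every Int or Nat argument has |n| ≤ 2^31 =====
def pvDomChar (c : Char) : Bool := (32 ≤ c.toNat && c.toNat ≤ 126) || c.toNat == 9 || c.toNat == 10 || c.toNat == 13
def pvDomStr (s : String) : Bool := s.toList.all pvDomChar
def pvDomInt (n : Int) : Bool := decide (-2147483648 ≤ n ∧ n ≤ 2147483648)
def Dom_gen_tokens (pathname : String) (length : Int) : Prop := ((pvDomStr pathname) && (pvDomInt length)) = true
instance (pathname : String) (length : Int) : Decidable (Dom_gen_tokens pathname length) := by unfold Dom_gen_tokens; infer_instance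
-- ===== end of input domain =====

-- B replaces A's index loop over window start positions with the zip-of-shifted-suffixes
-- n-gram idiom (transpose `length` offset views of the padded string); idiomatic, not faster.

-- ===== PORT A =====
def gen_tokens (pathname : String) (length : Int) : List String :=
  -- filler = "".join((length-1)*["|"])
  let filler : List Char := PySem.Chars.join [] (PySem.List.pyRepeat [['|']] (length - 1))
  -- pathname = filler + pathname + filler
  let padded : List Char := filler ++ pathname.toList ++ filler
  -- for pos in range(0, len(pathname) - (length - 1)): token_list.append(pathname[pos:pos+length])
  (PySem.List.pyRange 0 ((padded.length : Int) - (length - 1)) 1).foldl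
    (fun acc pos => acc ++ [String.mk (PySem.List.slice padded (some pos) (some (pos + length)))]) []

-- ===== PORT B =====
-- Python's n-ary zip over lists: emit the heads as a column while every row is
-- nonempty, then recurse on the tails; zip() of no rows is empty.
def pyZipN (rows : List (List Char)) : List (List Char) :=
  if h : rows.isEmpty ∨ rows.any List.isEmpty then []
  else (rows.map (fun r => r.headD ' ')) :: pyZipN (rows.map List.tail)
termination_by (rows.headD []).length
decreasing_by
  push_neg at h
  obtain ⟨h1, h2⟩ := h
  cases rows with
  | nil => simp at h1
  | cons r rs =>
    simp only [List.map_cons, List.headD_cons]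
    have hr : r ≠ [] := by
      intro hrnil
      apply h2
      simp [hrnil]
    have : 0 < r.length := List.length_pos_iff.mpr hr
    simp [List.length_tail]
    omega

def gen_tokens_alt (pathname : String) (length : Int) : List String :=
  -- filler = "|" * (length - 1)   (string repetition; empty when length ≤ 1 — exact)
  let filler : List Char := List.replicate (length - 1).toNat '|'
  let padded : List Char := filler ++ pathname.toList ++ filler
  -- zip(*(padded[i:] for i in range(length)))
  let rows : List (List Char) := (PySem.List.pyRange 0 length 1).map
    (fun i => PySem.List.slice padded (some i) none)
  -- ["".join(t) for t in zip(...)]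
  (pyZipN rows).map (fun t => String.mk (PySem.Chars.join [] (t.map (fun c => [c]))))

-- ===== PRECONDITION & SPEC =====
-- Pre_ excludes nonpositive token lengths, for which "all substrings of length n" is not
-- meaningfully defined: A's slice arithmetic returns degenerate empty/truncated tokens
-- there (no natural n-gram implementation produces them), while B returns no tokens.
def Pre_gen_tokens (pathname : String) (length : Int) : Prop := 1 ≤ length
instance (pathname : String) (length : Int) : Decidable (Pre_gen_tokens pathname length) := by unfold Pre_gen_tokens; infer_instance
def pvWitness_gen_tokens : String × Int := ("abc", 2)
def Spec_gen_tokens (pathname : String) (length : Int) (out : List String) : Prop := out = gen_tokens_alt pathname length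
instance (pathname : String) (length : Int) (out : List String) : Decidable (Spec_gen_tokens pathname length out) := by unfold Spec_gen_tokens; infer_instance

-- ===== CLAIM (what is proved, stated in full; the proofs are below) =====
def Claim_equal_gen_tokens : Prop := ∀ (pathname : String) (length : Int), Dom_gen_tokens pathname length → Pre_gen_tokens pathname length → Spec_gen_tokens pathname length (gen_tokens pathname length)

-- ===== LEMMAS AND PROOFS =====

-- The heads of the L suffix rows form the first window.
lemma map_headD_drop (cs : List Char) (L : Nat) (hL : L ≤ cs.length) :
    (List.range L).map (fun i => (cs.drop i).headD ' ') = cs.take L := by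
  apply List.ext_getElem
  · simp [hL]
  · intro i h1 h2
    simp only [List.getElem_map, List.getElem_range, List.getElem_take]
    have hi : i < cs.length := by simp at h1; omega
    rw [List.headD_eq_head?_getD, List.head?_drop]
    simp [hi]

-- zip of the L shifted suffixes of cs = the list of L-windows of cs.
lemma pyZipN_suffixes (L : Nat) (hL : 1 ≤ L) :
    ∀ cs : List Char, pyZipN ((List.range L).map (fun i => cs.drop i)) =
      (List.range (cs.length + 1 - L)).map (fun j => (cs.drop j).take L) := by
  intro cs
  induction cs with
  | nil =>
    rw [pyZipN.eq_def]
    have h : (((List.range L).map (fun i => ([] : List Char).drop i)).any List.isEmpty) = true := by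
      rw [List.any_eq_true]
      exact ⟨[], List.mem_map.mpr ⟨0, List.mem_range.mpr (by omega), by simp⟩, rfl⟩
    rw [dif_pos (Or.inr h)]
    simp
    omega
  | cons c cs ih =>
    by_cases hlen : (c :: cs).length < L
    · rw [pyZipN.eq_def]
      have h : (((List.range L).map (fun i => (c :: cs).drop i)).any List.isEmpty) = true := by
        rw [List.any_eq_true]
        refine ⟨(c :: cs).drop (L - 1), List.mem_map.mpr ⟨L - 1, List.mem_range.mpr (by omega), rfl⟩, ?_⟩
        rw [List.isEmpty_iff, List.drop_eq_nil_iff]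
        simp only [List.length_cons] at hlen ⊢
        omega
      rw [dif_pos (Or.inr h)]
      have hlen2 : cs.length + 1 < L := by simpa using hlen
      simp
      omega
    · push_neg at hlen
      rw [pyZipN.eq_def]
      have hne : ¬(((List.range L).map (fun i => (c :: cs).drop i)).isEmpty ∨
          ((List.range L).map (fun i => (c :: cs).drop i)).any List.isEmpty) := by
        rintro (h1 | h2)
        · rw [List.isEmpty_iff, List.map_eq_nil_iff, List.range_eq_nil] at h1
          omega
        · rw [List.any_eq_true] at h2
          obtain ⟨r, hrm, hemp⟩ := h2
          obtain ⟨i, hi, rfl⟩ := List.mem_map.mp hrm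
          rw [List.isEmpty_iff, List.drop_eq_nil_iff] at hemp
          simp only [List.length_cons] at hemp
          simp only [List.mem_range] at hi
          have : L ≤ cs.length + 1 := by simpa using hlen
          omega
      rw [dif_neg hne]
      -- tails of the rows = rows of the tail
      have htails : ((List.range L).map (fun i => (c :: cs).drop i)).map List.tail =
          (List.range L).map (fun i => cs.drop i) := by
        simp only [List.map_map, Function.comp_def]
        apply List.map_congr_left
        intro i _
        rw [List.tail_drop, List.drop_succ_cons]
      rw [htails, ih]
      -- heads = first window
      have hheads : ((List.range L).map (fun i => (c :: cs).drop i)).map (fun r => r.headD ' ') =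
          (c :: cs).take L := by
        rw [List.map_map]
        exact map_headD_drop (c :: cs) L hlen
      rw [hheads]
      -- reindex the RHS range
      have hlen2 : L ≤ cs.length + 1 := by simpa using hlen
      have hsplit : (c :: cs).length + 1 - L = (cs.length + 1 - L) + 1 := by
        simp only [List.length_cons]
        omega
      have hr : (List.range (cs.length + 1 - L + 1)).map
            (fun j => ((c :: cs).drop j).take L) =
          ((c :: cs).take L) ::
            (List.range (cs.length + 1 - L)).map (fun j => (cs.drop j).take L) := by
        rw [List.range_succ_eq_map]
        simp [Function.comp_def, List.drop_succ_cons]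
      rw [hsplit, hr]

-- A's loop unrolled to a map over the window starts.
lemma gen_tokens_eq (pathname : String) (length : Int) (h : 1 ≤ length) :
    gen_tokens pathname length =
      let cs := List.replicate (length - 1).toNat '|' ++ pathname.toList ++
                List.replicate (length - 1).toNat '|'
      (List.range (cs.length + 1 - length.toNat)).map
        (fun j => String.mk ((cs.drop j).take length.toNat)) := by
  unfold gen_tokens
  simp only
  have hfiller : PySem.Chars.join [] (PySem.List.pyRepeat [['|']] (length - 1)) =
      List.replicate (length - 1).toNat '|' := by
    rw [PySem.List.pyRepeat_singleton]
    have : (List.replicate (length - 1).toNat (['|'] : List Char)) =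
        (List.replicate (length - 1).toNat '|').map (fun c => [c]) := by
      simp
    rw [this, PySem.Chars.join_nil_singletons]
  rw [hfiller]
  set cs : List Char := List.replicate (length - 1).toNat '|' ++ pathname.toList ++
      List.replicate (length - 1).toNat '|' with hcs
  rw [show (List.foldl (fun acc pos => acc ++ [String.mk (PySem.List.slice cs (some pos) (some (pos + length)))])
        [] (PySem.List.pyRange 0 ((cs.length : Int) - (length - 1)) 1)) =
      [] ++ (PySem.List.pyRange 0 ((cs.length : Int) - (length - 1)) 1).map
        (fun pos => String.mk (PySem.List.slice cs (some pos) (some (pos + length)))) from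
    PySem.List.foldl_append_singleton_eq_map _ _ _]
  rw [List.nil_append, PySem.List.pyRange_one]
  rw [List.map_map]
  simp only [Int.sub_zero]
  have hlen : ((cs.length : Int) - (length - 1)).toNat = cs.length + 1 - length.toNat := by
    have : (length - 1).toNat ≤ cs.length := by
      rw [hcs]; simp
    omega
  rw [hlen]
  apply List.map_congr_left
  intro k hk
  simp only [Function.comp, zero_add]
  rw [PySem.List.slice_toNat _ (by positivity) (by positivity)]
  have h3 : (((k : Int)) + length).toNat - ((k : Int)).toNat = length.toNat := by omega
  simp only [Int.toNat_natCast] at h3 ⊢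
  rw [h3]

-- ===== VERDICT (by name: the statement is the Claim_ definition above) =====
theorem gen_tokens_spec : Claim_equal_gen_tokens := by
  intro pathname length _ hpre
  unfold Spec_gen_tokens gen_tokens_alt
  simp only
  have h1 : (1:Int) ≤ length := hpre
  -- B's rows are the suffixes
  set cs : List Char := List.replicate (length - 1).toNat '|' ++ pathname.toList ++
      List.replicate (length - 1).toNat '|' with hcs
  have hrows : (PySem.List.pyRange 0 length 1).map (fun i => PySem.List.slice cs (some i) none) =
      (List.range length.toNat).map (fun i => cs.drop i) := by
    rw [PySem.List.pyRange_one]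
    rw [List.map_map]
    simp only [Int.sub_zero]
    apply List.map_congr_left
    intro k _
    simp only [Function.comp, zero_add]
    rw [PySem.List.slice_from _ (by positivity)]
    simp
  rw [hrows, pyZipN_suffixes length.toNat (by omega) cs]
  rw [gen_tokens_eq pathname length h1]
  simp only [List.map_map]
  apply List.map_congr_left
  intro j _
  simp only [Function.comp]
  rw [PySem.Chars.join_nil_singletons]
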